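-- pv_equiv track=rewrite | github.com/kh277/BOJ | 백준/Silver/31860. 열심히 일하는 중/열심히 일하는 중.py | solve
-- ===== SOURCE A (Python) =====
-- import heapq
--
-- def solve(N, M, K, pq):
--     day = 0
--     accS = []
--     beforeS = 0
--     while pq:
--         curI = -heapq.heappop(pq)
--
--         # 일을 완료할 수 있는지 체크
--         if curI-M > K:
--             heapq.heappush(pq, -(curI-M))
--
--         # 만족도 계산
--         curS = beforeS // 2 + curI
--         beforeS = curS
--         accS.append(curS)
--         day += 1
--
--     return day, accS
-- ===== SOURCE B (Python) =====
-- def solve(N, M, K, pq):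
--     # Descent expansion + one sort instead of a running heap.
--     # Return-value equivalence needs pq to be a valid min-heap (heapq's
--     # documented precondition); pq.clear() replicates A's draining of pq.
--     vals = []
--     for x in pq:
--         v = -x
--         vals.append(v)
--         while v - M > K:
--             v -= M
--             vals.append(v)
--     vals.sort(reverse=True)
--     accS = []
--     beforeS = 0
--     for v in vals:
--         beforeS = beforeS // 2 + v
--         accS.append(beforeS)
--     pq.clear()
--     return len(accS), accS
-- ===== Notes on version B (the rewrite author's own statement) =====
-- stated objective: alternative
-- what changed: Replaces the running max-heap simulation by expanding each task's full descent sequence up front, sorting all emitted values once in descending order, and accumulating satisfaction in a single pass (the heap's pop order on a valid heap is exactly that descending order).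
-- outside the precondition, e.g. on solve(0, 1, 0, [-1, -3, -2]): A returns (6, [1, 3, 3, 3, 2, 2]), B returns (6, [3, 3, 3, 2, 2, 2])
import Mathlib
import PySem

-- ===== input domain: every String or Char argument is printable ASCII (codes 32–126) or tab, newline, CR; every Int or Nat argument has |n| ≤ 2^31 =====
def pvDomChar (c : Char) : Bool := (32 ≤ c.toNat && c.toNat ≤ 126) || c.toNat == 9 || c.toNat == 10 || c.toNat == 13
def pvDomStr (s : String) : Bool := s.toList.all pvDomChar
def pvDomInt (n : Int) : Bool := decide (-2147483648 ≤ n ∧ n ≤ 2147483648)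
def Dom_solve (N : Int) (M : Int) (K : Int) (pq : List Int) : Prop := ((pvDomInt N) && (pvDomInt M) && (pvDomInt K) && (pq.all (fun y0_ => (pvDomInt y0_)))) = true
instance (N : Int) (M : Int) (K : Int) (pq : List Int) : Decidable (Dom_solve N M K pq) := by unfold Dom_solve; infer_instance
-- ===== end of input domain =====

-- B replaces A's running max-heap by a descent expansion + one descending sort + one
-- accumulation pass; equivalence is about the RETURN value (A drains pq in place, B clears it).

-- ===== PORT A =====
-- Hand port of CPython's heapq internals (_siftdown, _siftup, heappush, heappop),
-- step for step; exact for the nonnegative indices these routines use.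
def siftdownLoop (a : List Int) (startpos : Nat) (pos : Nat) (newitem : Int) : List Int × Nat :=
  if _h : startpos < pos then
    let parentpos := (pos - 1) / 2
    let parent := a.getD parentpos 0
    if newitem < parent then siftdownLoop (a.set pos parent) startpos parentpos newitem
    else (a, pos)
  else (a, pos)
termination_by pos
decreasing_by have := Nat.div_le_self (pos - 1) 2; omega

def siftdown (a : List Int) (startpos : Nat) (pos : Nat) : List Int :=
  let newitem := a.getD pos 0
  let r := siftdownLoop a startpos pos newitem
  r.1.set r.2 newitem

def siftupLoop (a : List Int) (pos : Nat) (endpos : Nat) : List Int × Nat :=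
  let childpos := 2 * pos + 1
  if _h : childpos < endpos then
    let rightpos := childpos + 1
    let c := if rightpos < endpos ∧ ¬ (a.getD childpos 0 < a.getD rightpos 0) then rightpos else childpos
    siftupLoop (a.set pos (a.getD c 0)) c endpos
  else (a, pos)
termination_by endpos - pos
decreasing_by simp only [childpos] at *; split <;> omega

def siftup (a : List Int) (pos : Nat) : List Int :=
  let endpos := a.length
  let newitem := a.getD pos 0
  let r := siftupLoop a pos endpos
  siftdown (r.1.set r.2 newitem) pos r.2

def heappush (a : List Int) (item : Int) : List Int :=
  siftdown (a ++ [item]) 0 a.length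

def heappop (a : List Int) : Int × List Int :=
  let lastelt := a.getLastD 0
  let rest := a.dropLast
  if rest.isEmpty then (lastelt, [])
  else (rest.getD 0 0, siftup (rest.set 0 lastelt) 0)

-- A's while loop, with a fuel bound large enough on Pre_ (proved below).
def solveLoop (M : Int) (K : Int) : Nat → List Int → Int → List Int → Int → Int × List Int
  | 0, _, day, accS, _ => (day, accS)
  | fuel + 1, pq, day, accS, beforeS =>
    if pq.isEmpty then (day, accS)
    else
      let p := heappop pq
      let curI := -p.1
      let pq2 := if curI - M > K then heappush p.2 (-(curI - M)) else p.2
      let curS := PySem.Int.floordiv beforeS 2 + curI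
      solveLoop M K fuel pq2 (day + 1) (accS ++ [curS]) curS

def solve (N : Int) (M : Int) (K : Int) (pq : List Int) : Int × List Int :=
  solveLoop M K (pq.foldl (fun acc x => acc + ((-x - K).toNat / M.toNat + 2)) 0) pq 0 [] 0

-- ===== PORT B =====
-- the inner while loop of Source B producing v, v-M, v-2M, … (0 < M guard only for totality;
-- under Pre_ the Python loop never runs when M ≤ 0)
def descent (M : Int) (K : Int) (v : Int) : List Int :=
  v :: (if _h : v - M > K ∧ 0 < M then descent M K (v - M) else [])
termination_by (v - K).toNat
decreasing_by omega

def solve_alt (N : Int) (M : Int) (K : Int) (pq : List Int) : Int × List Int :=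
  let vals := pq.foldl (fun acc x => acc ++ descent M K (-x)) []
  let svals := PySem.List.sorted vals (fun v => v) true
  let r := svals.foldl (fun (st : List Int × Int) v =>
      let b := PySem.Int.floordiv st.2 2 + v
      (st.1 ++ [b], b)) ([], 0)
  ((r.1.length : Int), r.1)

-- ===== PRECONDITION & SPEC =====
-- the min-heap shape heapq's documentation requires of pq
def IsHeap (l : List Int) : Prop :=
  ∀ c : Nat, c < l.length → 0 < c → l.getD ((c - 1) / 2) 0 ≤ l.getD c 0

-- Pre_ excludes (i) pq violating the heap invariant (heapq's documented precondition), on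
-- which heappop's results are accidental sift artefacts B does not reproduce, and (ii)
-- M ≤ 0 with some task still above the threshold, on which A's while loop never terminates.
def Pre_solve (N : Int) (M : Int) (K : Int) (pq : List Int) : Prop :=
  IsHeap pq ∧ (0 < M ∨ ∀ x ∈ pq, -x - M ≤ K)

instance (N : Int) (M : Int) (K : Int) (pq : List Int) : Decidable (Pre_solve N M K pq) := by
  unfold Pre_solve IsHeap; infer_instance

def pvWitness_solve : Int × Int × Int × List Int := (3, 2, 1, [-9, -4, -7])

def Spec_solve (N : Int) (M : Int) (K : Int) (pq : List Int) (out : Int × List Int) : Prop := out = solve_alt N M K pq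
instance (N : Int) (M : Int) (K : Int) (pq : List Int) (out : Int × List Int) : Decidable (Spec_solve N M K pq out) := by unfold Spec_solve; infer_instance

-- ===== CLAIM (what is proved, stated in full; the proofs are below) =====
def Claim_equal_solve : Prop := ∀ (N : Int) (M : Int) (K : Int) (pq : List Int), Dom_solve N M K pq → Pre_solve N M K pq → Spec_solve N M K pq (solve N M K pq)

-- ===== LEMMAS AND PROOFS =====

-- getD after set, in one closed form
theorem getD_set (l : List Int) (i j : Nat) (v : Int) :
    (l.set i v).getD j 0 = if j = i ∧ i < l.length then v else l.getD j 0 := by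
  simp [List.getD_eq_getElem?_getD, List.getElem?_set]
  split_ifs with h1 h2 h3 <;> simp_all

theorem set_getD_self (l : List Int) (i : Nat) (h : i < l.length) :
    l.set i (l.getD i 0) = l := by
  rw [List.getD_eq_getElem?_getD, List.getElem?_eq_getElem h]; simp

theorem getD_zero_mem (l : List Int) (h : l ≠ []) : l.getD 0 0 ∈ l := by
  rw [List.getD_eq_getElem?_getD]
  have : 0 < l.length := List.length_pos_iff.mpr h
  simp [List.getElem?_eq_getElem this]

theorem count_set (l : List Int) (i : Nat) (v y : Int) (h : i < l.length) :
    (l.set i v).count y + (if l.getD i 0 = y then 1 else 0)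
      = l.count y + (if v = y then 1 else 0) := by
  have hd : l = l.take i ++ l.getD i 0 :: l.drop (i + 1) := by
    conv_lhs => rw [← List.take_append_drop i l]
    rw [List.getD_eq_getElem?_getD, List.getElem?_eq_getElem h]
    simp [List.getElem_cons_drop]
  rw [List.set_eq_take_cons_drop _ h]
  conv_rhs => rw [hd]
  simp [List.count_append, List.count_cons]
  split_ifs <;> omega

theorem set_set_perm (a : List Int) (i j : Nat) (x : Int) (hij : i ≠ j)
    (hi : i < a.length) (hj : j < a.length) :
    ((a.set i (a.getD j 0)).set j x).Perm (a.set i x) := by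
  apply List.perm_iff_count.mpr
  intro y
  have hj' : j < (a.set i (a.getD j 0)).length := by simpa using hj
  have h1 := count_set (a.set i (a.getD j 0)) j x y hj'
  have h2 := count_set a i (a.getD j 0) y hi
  have h3 := count_set a i x y hi
  have hg : (a.set i (a.getD j 0)).getD j 0 = a.getD j 0 := by
    rw [getD_set]; simp
  rw [hg] at h1
  omega

theorem heap_root_le (l : List Int) (hl : IsHeap l) :
    ∀ c : Nat, c < l.length → l.getD 0 0 ≤ l.getD c 0 := by
  intro c
  induction c using Nat.strong_induction_on with
  | _ c ih =>
    intro hc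
    rcases Nat.eq_zero_or_pos c with h0 | h0
    · subst h0; exact le_refl _
    · have hp : (c - 1) / 2 < c := by have := Nat.div_le_self (c - 1) 2; omega
      exact le_trans (ih _ hp (lt_trans hp hc)) (hl c hc h0)

-- invariant for the bubble-up loop (hole at pos to be filled with x)
def INV (a : List Int) (pos : Nat) (x : Int) : Prop :=
  pos < a.length ∧
  (∀ c : Nat, 0 < c → c < a.length → c ≠ pos →
      (a.set pos x).getD ((c - 1) / 2) 0 ≤ (a.set pos x).getD c 0) ∧
  (0 < pos → ∀ c : Nat, c < a.length → (c = 2 * pos + 1 ∨ c = 2 * pos + 2) →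
      a.getD ((pos - 1) / 2) 0 ≤ a.getD c 0)

theorem INV_step (a : List Int) (pos : Nat) (x : Int) (h0 : 0 < pos)
    (hinv : INV a pos x) (hlt : x < a.getD ((pos - 1) / 2) 0) :
    INV (a.set pos (a.getD ((pos - 1) / 2) 0)) ((pos - 1) / 2) x := by
  obtain ⟨hp, h2, h3⟩ := hinv
  have hpplt : (pos - 1) / 2 < pos := by have := Nat.div_le_self (pos - 1) 2; omega
  have hppl : (pos - 1) / 2 < a.length := lt_trans hpplt hp
  have bv : ∀ k : Nat, (a.set pos x).getD k 0 = if k = pos then x else a.getD k 0 := by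
    intro k; rw [getD_set]; simp [hp]
  have pv : ∀ k : Nat, (a.set pos (a.getD ((pos - 1) / 2) 0)).getD k 0
      = if k = pos then a.getD ((pos - 1) / 2) 0 else a.getD k 0 := by
    intro k; rw [getD_set]; simp [hp]
  have nv : ∀ k : Nat, ((a.set pos (a.getD ((pos - 1) / 2) 0)).set ((pos - 1) / 2) x).getD k 0
      = if k = (pos - 1) / 2 then x else if k = pos then a.getD ((pos - 1) / 2) 0 else a.getD k 0 := by
    intro k
    rw [getD_set, pv]
    simp only [List.length_set, hppl, and_true]
  refine ⟨by simpa using hppl, ?_, ?_⟩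
  · intro c hc0 hcl hcpp
    have hcl' : c < a.length := by simpa using hcl
    rw [nv, nv]
    by_cases hc_p : c = pos
    · subst hc_p
      rw [if_pos rfl, if_neg (by omega : ¬ c = (c - 1) / 2), if_pos rfl]
      exact le_of_lt hlt
    · by_cases hq_p : (c - 1) / 2 = pos
      · have hcch : c = 2 * pos + 1 ∨ c = 2 * pos + 2 := by omega
        rw [if_neg (by omega : ¬ (c - 1) / 2 = (pos - 1) / 2), if_pos hq_p,
            if_neg hcpp, if_neg hc_p]
        exact h3 h0 c hcl' hcch
      · by_cases hq_pp : (c - 1) / 2 = (pos - 1) / 2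
        · rw [if_pos hq_pp, if_neg hcpp, if_neg hc_p]
          have := h2 c hc0 hcl' hc_p
          rw [bv, bv, if_neg hc_p, if_neg (by rw [hq_pp]; omega : ¬ (c - 1) / 2 = pos)] at this
          rw [hq_pp] at this
          exact le_trans (le_of_lt hlt) this
        · rw [if_neg hq_pp, if_neg hq_p, if_neg hcpp, if_neg hc_p]
          have := h2 c hc0 hcl' hc_p
          rw [bv, bv, if_neg hc_p, if_neg hq_p] at this
          exact this
  · intro hpp0 c hcl hch
    have hcl' : c < a.length := by simpa using hcl
    have hgp : (((pos - 1) / 2) - 1) / 2 ≠ pos := by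
      have := Nat.div_le_self ((pos - 1) / 2 - 1) 2; omega
    have hgp_pp : a.getD ((((pos - 1) / 2) - 1) / 2) 0 ≤ a.getD ((pos - 1) / 2) 0 := by
      have := h2 ((pos - 1) / 2) hpp0 hppl (by omega)
      rw [bv, bv, if_neg (by omega : ¬ (pos - 1) / 2 = pos), if_neg hgp] at this
      exact this
    rw [pv, pv, if_neg hgp]
    by_cases hc_p : c = pos
    · rw [if_pos hc_p]; exact hgp_pp
    · rw [if_neg hc_p]
      have hc0 : 0 < c := by omega
      have := h2 c hc0 hcl' hc_p
      rw [bv, bv, if_neg hc_p, if_neg (by omega : ¬ (c - 1) / 2 = pos)] at this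
      rw [(by omega : (c - 1) / 2 = (pos - 1) / 2)] at this
      exact le_trans hgp_pp this

theorem INV_exit (a : List Int) (pos : Nat) (x : Int) (hinv : INV a pos x)
    (hge : pos = 0 ∨ a.getD ((pos - 1) / 2) 0 ≤ x) : IsHeap (a.set pos x) := by
  obtain ⟨hp, h2, _⟩ := hinv
  intro c hcl hc0
  have hcl' : c < a.length := by simpa using hcl
  by_cases hc : c = pos
  · subst hc
    rcases hge with h0 | hle
    · omega
    · have hcpp : (c - 1) / 2 ≠ c := by have := Nat.div_le_self (c - 1) 2; omega
      rw [getD_set, getD_set]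
      rw [if_neg (by simp [hcpp]), if_pos ⟨rfl, hcl'⟩]
      exact hle
  · exact h2 c hc0 hcl' hc

theorem siftdownLoop_spec (a : List Int) (pos : Nat) (x : Int) :
    INV a pos x →
    IsHeap ((siftdownLoop a 0 pos x).1.set (siftdownLoop a 0 pos x).2 x) ∧
    ((siftdownLoop a 0 pos x).1.set (siftdownLoop a 0 pos x).2 x).Perm (a.set pos x) := by
  fun_induction siftdownLoop a 0 pos x with
  | case1 a pos h parentpos parent hlt ih =>
    intro hinv
    have hstep := INV_step a pos x h hinv hlt
    have hres := ih hstep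
    refine ⟨hres.1, hres.2.trans ?_⟩
    exact set_set_perm a pos ((pos - 1) / 2) x (by omega) hinv.1
      (lt_trans (by have := Nat.div_le_self (pos - 1) 2; omega) hinv.1)
  | case2 a pos h parentpos parent hlt =>
    intro hinv
    exact ⟨INV_exit a pos x hinv (Or.inr (not_lt.mp hlt)), List.Perm.refl _⟩
  | case3 a pos h =>
    intro hinv
    exact ⟨INV_exit a pos x hinv (Or.inl (by omega)), List.Perm.refl _⟩

-- invariant for the hole-sinking loop of _siftup
def DINV (a : List Int) (pos : Nat) : Prop :=
  pos < a.length ∧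
  (∀ c : Nat, 0 < c → c < a.length → (c - 1) / 2 ≠ pos →
      a.getD ((c - 1) / 2) 0 ≤ a.getD c 0) ∧
  (0 < pos → ∀ c : Nat, c < a.length → (c = 2 * pos + 1 ∨ c = 2 * pos + 2) →
      a.getD ((pos - 1) / 2) 0 ≤ a.getD c 0)

theorem DINV_step (a : List Int) (pos c : Nat) (hd : DINV a pos)
    (hc1 : c = 2 * pos + 1 ∨ c = 2 * pos + 2) (hcl : c < a.length)
    (hmin : ∀ d : Nat, (d = 2 * pos + 1 ∨ d = 2 * pos + 2) → d < a.length →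
      a.getD c 0 ≤ a.getD d 0) :
    DINV (a.set pos (a.getD c 0)) c := by
  obtain ⟨hp, h2, h3⟩ := hd
  have hcpos : pos < c := by omega
  have av : ∀ k : Nat, (a.set pos (a.getD c 0)).getD k 0
      = if k = pos then a.getD c 0 else a.getD k 0 := by
    intro k; rw [getD_set]; simp [hp]
  refine ⟨by simpa using hcl, ?_, ?_⟩
  · intro d hd0 hdl hdpar
    have hdl' : d < a.length := by simpa using hdl
    rw [av, av]
    by_cases hd_pos : d = pos
    · have hpos0 : 0 < pos := by omega
      rw [if_neg (by omega : ¬ (d - 1) / 2 = pos), if_pos hd_pos,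
          (by omega : (d - 1) / 2 = (pos - 1) / 2)]
      exact h3 hpos0 c hcl hc1
    · rw [if_neg hd_pos]
      by_cases hdpar_pos : (d - 1) / 2 = pos
      · rw [if_pos hdpar_pos]
        exact hmin d (by omega) hdl'
      · rw [if_neg hdpar_pos]
        exact h2 d hd0 hdl' (by omega)
  · intro _ d hdl hdc
    have hdl' : d < a.length := by simpa using hdl
    have hparc : (c - 1) / 2 = pos := by omega
    rw [av, av, hparc, if_pos rfl, if_neg (by omega : ¬ d = pos)]
    have hdc' : (d - 1) / 2 = c := by omega
    have := h2 d (by omega) hdl' (by omega)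
    rw [hdc'] at this
    exact this

theorem siftupLoop_spec (a : List Int) (pos : Nat) (endpos : Nat) :
    endpos = a.length → DINV a pos →
    (∀ x, ((siftupLoop a pos endpos).1.set (siftupLoop a pos endpos).2 x).Perm (a.set pos x)) ∧
    DINV (siftupLoop a pos endpos).1 (siftupLoop a pos endpos).2 ∧
    ¬ (2 * (siftupLoop a pos endpos).2 + 1 < (siftupLoop a pos endpos).1.length) ∧
    (siftupLoop a pos endpos).1.length = a.length := by
  fun_induction siftupLoop a pos endpos with
  | case1 a pos childpos h rightpos c ih =>
    intro hlen hinv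
    have hcp : childpos = 2 * pos + 1 := rfl
    have hrp : rightpos = 2 * pos + 2 := rfl
    have main : (c = 2 * pos + 1 ∨ c = 2 * pos + 2) ∧ c < a.length ∧
        (∀ d : Nat, (d = 2 * pos + 1 ∨ d = 2 * pos + 2) → d < a.length →
          a.getD c 0 ≤ a.getD d 0) := by
      by_cases hch : rightpos < endpos ∧ ¬ a.getD childpos 0 < a.getD rightpos 0
      · have hc_eq : c = rightpos := by simp only [c]; rw [dif_pos hch]
        refine ⟨by omega, by omega, ?_⟩
        intro d hd hdl
        rcases hd with hd | hd
        · rw [hc_eq, (by omega : d = childpos)]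
          exact not_lt.mp hch.2
        · rw [hc_eq, (by omega : d = rightpos)]
      · have hc_eq : c = childpos := by simp only [c]; rw [dif_neg hch]
        refine ⟨by omega, by omega, ?_⟩
        intro d hd hdl
        rcases hd with hd | hd
        · rw [hc_eq, (by omega : d = childpos)]
        · have hdr : d = rightpos := by omega
          have hrlt : rightpos < endpos := by omega
          have hlt : a.getD childpos 0 < a.getD rightpos 0 := by
            by_contra hnot
            exact hch ⟨hrlt, hnot⟩
          rw [hc_eq, hdr]
          exact le_of_lt hlt
    obtain ⟨hchild, hcl, hmin⟩ := main
    have hstep := DINV_step a pos c hinv hchild hcl hmin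
    have hres := ih (by simpa using hlen) hstep
    obtain ⟨hperm, hdinv, hleaf, hlen'⟩ := hres
    refine ⟨?_, hdinv, hleaf, by simpa using hlen'⟩
    intro x
    exact (hperm x).trans (set_set_perm a pos c x (by omega) hinv.1 hcl)
  | case2 a pos childpos h =>
    intro hlen hinv
    refine ⟨fun x => List.Perm.refl _, hinv, ?_, rfl⟩
    have hcp : childpos = 2 * pos + 1 := rfl
    show ¬ (2 * pos + 1 < a.length)
    omega

theorem siftdown_spec (a : List Int) (pos : Nat) (hinv : INV a pos (a.getD pos 0)) :
    IsHeap (siftdown a 0 pos) ∧ (siftdown a 0 pos).Perm a := by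
  have h := siftdownLoop_spec a pos (a.getD pos 0) hinv
  unfold siftdown
  refine ⟨h.1, h.2.trans ?_⟩
  rw [set_getD_self a pos hinv.1]

theorem siftup_spec (a : List Int) (hd : DINV a 0) (hne : 0 < a.length) :
    IsHeap (siftup a 0) ∧ (siftup a 0).Perm a := by
  obtain ⟨hperm, hdinv, hleaf, hlen⟩ := siftupLoop_spec a 0 a.length rfl hd
  set r := siftupLoop a 0 a.length with hr
  have hr2len : r.2 < r.1.length := hdinv.1
  have hgetd : (r.1.set r.2 (a.getD 0 0)).getD r.2 0 = a.getD 0 0 := by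
    rw [getD_set]; simp [hr2len]
  have hinv : INV (r.1.set r.2 (a.getD 0 0)) r.2 ((r.1.set r.2 (a.getD 0 0)).getD r.2 0) := by
    rw [hgetd]
    refine ⟨by simpa using hr2len, ?_, ?_⟩
    · intro c hc0 hcl hcr
      have hcl' : c < r.1.length := by simpa using hcl
      rw [List.set_set]
      have hparc : (c - 1) / 2 ≠ r.2 := by
        intro hEq
        have hcc : c = 2 * r.2 + 1 ∨ c = 2 * r.2 + 2 := by omega
        omega
      rw [getD_set, getD_set, if_neg (fun hc => hparc hc.1), if_neg (fun hc => hcr hc.1)]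
      exact hdinv.2.1 c hc0 hcl' hparc
    · intro _ c hcl hch
      have hcl' : c < r.1.length := by simpa using hcl
      omega
  have hsd := siftdown_spec (r.1.set r.2 (a.getD 0 0)) r.2 hinv
  refine ⟨hsd.1, hsd.2.trans ?_⟩
  exact (hperm (a.getD 0 0)).trans (by rw [set_getD_self a 0 hne])

theorem heappush_spec (l : List Int) (x : Int) (hl : IsHeap l) :
    IsHeap (heappush l x) ∧ (heappush l x).Perm (l ++ [x]) := by
  have hx : (l ++ [x]).getD l.length 0 = x := by
    rw [List.getD_eq_getElem?_getD, List.getElem?_concat_length]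
    rfl
  have hsetid : (l ++ [x]).set l.length x = l ++ [x] := by simp
  have hinv : INV (l ++ [x]) l.length ((l ++ [x]).getD l.length 0) := by
    rw [hx]
    refine ⟨by simp, ?_, ?_⟩
    · intro c hc0 hcl hcp
      have hcl' : c < l.length + 1 := by simpa using hcl
      have hcll : c < l.length := by omega
      have hpl : (c - 1) / 2 < l.length := by
        have := Nat.div_le_self (c - 1) 2; omega
      rw [hsetid]
      rw [List.getD_eq_getElem?_getD, List.getD_eq_getElem?_getD,
          List.getElem?_append_left hpl, List.getElem?_append_left hcll,
          ← List.getD_eq_getElem?_getD, ← List.getD_eq_getElem?_getD]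
      exact hl c hcll hc0
    · intro _ c hcl hch
      have : c < l.length + 1 := by simpa using hcl
      omega
  have hsd := siftdown_spec (l ++ [x]) l.length (by rw [hx] at hinv ⊢; exact hinv)
  exact hsd

theorem heappop_spec (l : List Int) (hl : IsHeap l) (hne : l ≠ []) :
    (heappop l).1 = l.getD 0 0 ∧ IsHeap (heappop l).2 ∧ (l.getD 0 0 :: (heappop l).2).Perm l := by
  have hlen : 0 < l.length := List.length_pos_iff.mpr hne
  by_cases hone : l.dropLast = []
  · -- length-1 list
    obtain ⟨v, hv⟩ : ∃ v, l = [v] := by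
      rcases l with _ | ⟨v, t⟩
      · exact absurd rfl hne
      · rcases t with _ | ⟨w, t'⟩
        · exact ⟨v, rfl⟩
        · simp [List.dropLast] at hone
    subst hv
    refine ⟨rfl, ?_, ?_⟩
    · intro c hcl hc0
      simp [heappop] at hcl
    · simp [heappop]
  · have hrlen : 0 < l.dropLast.length := List.length_pos_iff.mpr hone
    have hstep : heappop l = (l.dropLast.getD 0 0, siftup (l.dropLast.set 0 (l.getLastD 0)) 0) := by
      rw [heappop]
      simp [List.isEmpty_iff, hone]
    have hdec : l = l.dropLast ++ [l.getLast hne] := (List.dropLast_concat_getLast hne).symm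
    have hlastD : l.getLastD 0 = l.getLast hne := by
      conv_lhs => rw [hdec]
      simp
    have hget0 : l.dropLast.getD 0 0 = l.getD 0 0 := by
      rw [List.getD_eq_getElem?_getD, List.getD_eq_getElem?_getD,
          List.getElem?_eq_getElem hrlen, List.getElem?_eq_getElem hlen]
      simp [List.getElem_dropLast]
    have hdl : l.dropLast.length = l.length - 1 := List.length_dropLast
    have hdinv : DINV (l.dropLast.set 0 (l.getLastD 0)) 0 := by
      refine ⟨by simp; omega, ?_, ?_⟩
      · intro c hc0 hcl hcp
        have hcl' : c < l.dropLast.length := by simpa using hcl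
        have hp1 : 0 < (c - 1) / 2 := by omega
        have hpl : (c - 1) / 2 < l.dropLast.length := by
          have := Nat.div_le_self (c - 1) 2; omega
        have hv : ∀ k : Nat, 0 < k → k < l.dropLast.length →
            (l.dropLast.set 0 (l.getLastD 0)).getD k 0 = l.getD k 0 := by
          intro k hk0 hkl
          rw [getD_set, if_neg (by omega : ¬ (k = 0 ∧ 0 < l.dropLast.length))]
          rw [List.getD_eq_getElem?_getD, List.getD_eq_getElem?_getD,
              List.getElem?_eq_getElem hkl, List.getElem?_eq_getElem (by omega : k < l.length)]
          simp [List.getElem_dropLast]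
        rw [hv _ hp1 hpl, hv _ hc0 hcl']
        exact hl c (by omega) hc0
      · intro h0 _ _ _
        omega
    obtain ⟨hheap, hperm⟩ := siftup_spec (l.dropLast.set 0 (l.getLastD 0)) hdinv (by simp; omega)
    rw [hstep]
    refine ⟨hget0, hheap, ?_⟩
    apply List.perm_iff_count.mpr
    intro y
    have hcnt := count_set l.dropLast 0 (l.getLastD 0) y hrlen
    have hcs : (siftup (l.dropLast.set 0 (l.getLastD 0)) 0).count y
        = (l.dropLast.set 0 (l.getLastD 0)).count y := hperm.count_eq y
    have hcl2 : l.count y = l.dropLast.count y + (if l.getLastD 0 = y then 1 else 0) := by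
      conv_lhs => rw [hdec]
      rw [hlastD]
      by_cases hg : l.getLast hne = y <;> simp [List.count_append, hg]
    have hcc : (l.getD 0 0 :: siftup (l.dropLast.set 0 (l.getLastD 0)) 0).count y
        = (siftup (l.dropLast.set 0 (l.getLastD 0)) 0).count y + (if l.getD 0 0 = y then 1 else 0) := by
      by_cases hg : l.getD 0 0 = y <;> simp [List.count_cons]
    rw [hcc, hcs]
    rw [hget0] at hcnt
    omega

-- ghost stream: all values A will ever pop, B-side expansion
def Em (M K : Int) (h : List Int) : List Int := h.flatMap (fun x => descent M K (-x))

def sortedDesc (xs : List Int) : List Int := PySem.List.sorted xs (fun v => v) true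

def streamAcc (b : Int) : List Int → List Int
  | [] => []
  | v :: t => (PySem.Int.floordiv b 2 + v) :: streamAcc (PySem.Int.floordiv b 2 + v) t

def runStream (d : Int) (acc : List Int) (b : Int) : List Int → Int × List Int
  | [] => (d, acc)
  | v :: t => runStream (d + 1) (acc ++ [PySem.Int.floordiv b 2 + v]) (PySem.Int.floordiv b 2 + v) t

theorem sortedDesc_eq_of_perm (xs ys : List Int) (hp : ys.Perm xs) (hs : ys.Pairwise (· ≥ ·)) :
    sortedDesc xs = ys := by
  have p1 : (sortedDesc xs).Perm ys := (PySem.List.sorted_perm xs _ _).trans hp.symm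
  have s1 : (sortedDesc xs).Pairwise (· ≥ ·) := PySem.List.sorted_pairwise_rev xs (fun v => v)
  exact p1.eq_of_pairwise (fun _ _ _ _ hab hba => le_antisymm hba hab) s1 hs

theorem sortedDesc_cons_of_max (xs t : List Int) (m : Int) (hp : xs.Perm (m :: t))
    (hmax : ∀ y ∈ t, y ≤ m) : sortedDesc xs = m :: sortedDesc t := by
  refine sortedDesc_eq_of_perm xs (m :: sortedDesc t) ?_ ?_
  · exact ((List.Perm.cons m (PySem.List.sorted_perm t _ _))).trans hp.symm
  · refine List.pairwise_cons.mpr ⟨?_, PySem.List.sorted_pairwise_rev t (fun v => v)⟩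
    intro y hy
    exact hmax y ((PySem.List.sorted_perm t _ _).mem_iff.mp hy)

theorem descent_eq_pos (M K v : Int) (h : v - M > K ∧ 0 < M) :
    descent M K v = v :: descent M K (v - M) := by
  rw [descent, dif_pos h]

theorem descent_eq_stop (M K v : Int) (h : ¬ (v - M > K ∧ 0 < M)) :
    descent M K v = [v] := by
  rw [descent, dif_neg h]

theorem descent_le (M K v : Int) : ∀ y ∈ descent M K v, y ≤ v := by
  fun_induction descent M K v with
  | case1 v ih =>
    intro y hy
    by_cases h : v - M > K ∧ 0 < M
    · rw [dif_pos h] at hy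
      rcases List.mem_cons.mp hy with hy | hy
      · omega
      · have := ih h y hy
        omega
    · rw [dif_neg h] at hy
      rcases List.mem_cons.mp hy with hy | hy
      · omega
      · simp at hy

theorem descent_len (M K v : Int) : (descent M K v).length ≤ (v - K).toNat / M.toNat + 2 := by
  fun_induction descent M K v with
  | case1 v ih =>
    by_cases h : v - M > K ∧ 0 < M
    · have hsplit : (v - K).toNat = (v - M - K).toNat + M.toNat := by omega
      have hM0 : 0 < M.toNat := by omega
      rw [dif_pos h, List.length_cons, hsplit, Nat.add_div_right _ hM0]
      have := ih h
      omega
    · rw [dif_neg h]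
      simp

theorem Em_cons (M K x : Int) (t : List Int) :
    Em M K (x :: t) = descent M K (-x) ++ Em M K t := rfl

theorem Em_append (M K : Int) (s t : List Int) :
    Em M K (s ++ t) = Em M K s ++ Em M K t := by
  simp [Em]

theorem Em_perm (M K : Int) {h h' : List Int} (hp : h.Perm h') :
    (Em M K h).Perm (Em M K h') :=
  List.Perm.flatMap_right _ hp

theorem Em_eq_nil (M K : Int) (h : List Int) (he : Em M K h = []) : h = [] := by
  cases h with
  | nil => rfl
  | cons x t =>
    rw [Em_cons] at he
    have hd : descent M K (-x) ≠ [] := by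
      rw [descent]; simp
    simp [List.append_eq_nil_iff] at he
    exact absurd he.1 hd

theorem heap_le_mem (h : List Int) (hh : IsHeap h) : ∀ x ∈ h, h.getD 0 0 ≤ x := by
  intro x hx
  obtain ⟨i, hi, hxe⟩ := List.mem_iff_getElem.mp hx
  have h0 := heap_root_le h hh i hi
  have hgi : h.getD i 0 = x := by
    rw [List.getD_eq_getElem?_getD, List.getElem?_eq_getElem hi]
    simpa using hxe
  rw [hgi] at h0
  exact h0

theorem hmaxEm (M K : Int) (h : List Int) (hh : IsHeap h) :
    ∀ y ∈ Em M K h, y ≤ -(h.getD 0 0) := by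
  intro y hy
  rw [Em] at hy
  obtain ⟨x, hx, hyx⟩ := List.mem_flatMap.mp hy
  have h1 := descent_le M K (-x) y hyx
  have h2 := heap_le_mem h hh x hx
  omega

theorem solveLoop_step (M K : Int) (fuel : Nat) (pq : List Int) (day b : Int)
    (acc : List Int) (hne : pq ≠ []) :
    solveLoop M K (fuel + 1) pq day acc b =
      solveLoop M K fuel
        (if -(heappop pq).1 - M > K then heappush (heappop pq).2 (-(-(heappop pq).1 - M)) else (heappop pq).2)
        (day + 1) (acc ++ [PySem.Int.floordiv b 2 + -(heappop pq).1])
        (PySem.Int.floordiv b 2 + -(heappop pq).1) := by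
  conv_lhs => rw [solveLoop]
  rw [if_neg (by simp [hne])]

theorem solveLoop_eq_runStream (M K : Int) (fuel : Nat) :
    ∀ (h : List Int) (day : Int) (acc : List Int) (b : Int),
      IsHeap h → (0 < M ∨ ∀ x ∈ h, -x - M ≤ K) → (Em M K h).length ≤ fuel →
      solveLoop M K fuel h day acc b = runStream day acc b (sortedDesc (Em M K h)) := by
  induction fuel with
  | zero =>
    intro h day acc b hh hp hlen
    have hnil : h = [] := Em_eq_nil M K h (List.length_eq_zero_iff.mp (Nat.le_zero.mp hlen))
    subst hnil
    rfl
  | succ fuel ih =>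
    intro h day acc b hh hp hlen
    by_cases hnil : h = []
    · subst hnil
      rfl
    · obtain ⟨hpop1, hpop2, hpop3⟩ := heappop_spec h hh hnil
      have hmax := hmaxEm M K h hh
      rw [solveLoop_step M K fuel h day b acc hnil, hpop1]
      by_cases hcond : -(h.getD 0 0) - M > K
      · -- push branch
        have hM : 0 < M := by
          rcases hp with hM | hall
          · exact hM
          · exfalso
            have := hall _ (getD_zero_mem h hnil)
            omega
        obtain ⟨hpushheap, hpushperm⟩ :=
          heappush_spec (heappop h).2 (-(-(h.getD 0 0) - M)) hpop2
        have hEms : Em M K [-(-(h.getD 0 0) - M)] = descent M K (-(h.getD 0 0) - M) := by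
          show descent M K (-(-(-(h.getD 0 0) - M))) ++ [] = _
          rw [neg_neg, List.append_nil]
        have p1 : (Em M K h).Perm (descent M K (-(h.getD 0 0)) ++ Em M K (heappop h).2) := by
          rw [← Em_cons]
          exact Em_perm M K hpop3.symm
        have p2 : descent M K (-(h.getD 0 0)) ++ Em M K (heappop h).2
            = -(h.getD 0 0) :: (descent M K (-(h.getD 0 0) - M) ++ Em M K (heappop h).2) := by
          rw [descent_eq_pos M K _ ⟨hcond, hM⟩]
          rfl
        have p3 : (Em M K (heappush (heappop h).2 (-(-(h.getD 0 0) - M)))).Perm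
            (descent M K (-(h.getD 0 0) - M) ++ Em M K (heappop h).2) := by
          have := Em_perm M K hpushperm
          rw [Em_append, hEms] at this
          exact this.trans List.perm_append_comm
        have hEm : (Em M K h).Perm
            (-(h.getD 0 0) :: Em M K (heappush (heappop h).2 (-(-(h.getD 0 0) - M)))) := by
          refine p1.trans ?_
          rw [p2]
          exact (List.Perm.cons _ p3.symm)
        have hsorted : sortedDesc (Em M K h)
            = -(h.getD 0 0) :: sortedDesc (Em M K (heappush (heappop h).2 (-(-(h.getD 0 0) - M)))) := by
          refine sortedDesc_cons_of_max _ _ _ hEm ?_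
          intro y hy
          exact hmax y (hEm.symm.subset (List.mem_cons_of_mem _ hy))
        rw [if_pos hcond, hsorted, runStream]
        exact ih _ _ _ _ hpushheap (Or.inl hM)
          (by have := hEm.length_eq; rw [List.length_cons] at this; omega)
      · -- no-push branch
        have hstop : descent M K (-(h.getD 0 0)) = [-(h.getD 0 0)] := by
          apply descent_eq_stop
          intro hcontra
          exact hcond hcontra.1
        have hEm : (Em M K h).Perm (-(h.getD 0 0) :: Em M K (heappop h).2) := by
          have p1 : (Em M K h).Perm (descent M K (-(h.getD 0 0)) ++ Em M K (heappop h).2) := by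
            rw [← Em_cons]
            exact Em_perm M K hpop3.symm
          rw [hstop] at p1
          exact p1
        have hsorted : sortedDesc (Em M K h)
            = -(h.getD 0 0) :: sortedDesc (Em M K (heappop h).2) := by
          refine sortedDesc_cons_of_max _ _ _ hEm ?_
          intro y hy
          exact hmax y (hEm.symm.subset (List.mem_cons_of_mem _ hy))
        have hp2 : 0 < M ∨ ∀ x ∈ (heappop h).2, -x - M ≤ K := by
          rcases hp with hM | hall
          · exact Or.inl hM
          · refine Or.inr ?_
            intro x hx
            exact hall x (hpop3.subset (List.mem_cons_of_mem _ hx))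
        rw [if_neg hcond, hsorted, runStream]
        exact ih _ _ _ _ hpop2 hp2
          (by have := hEm.length_eq; rw [List.length_cons] at this; omega)

theorem runStream_char (seq : List Int) : ∀ (d : Int) (acc : List Int) (b : Int),
    runStream d acc b seq = (d + seq.length, acc ++ streamAcc b seq) := by
  induction seq with
  | nil => intro d acc b; simp [runStream, streamAcc]
  | cons v t ih => intro d acc b; simp [runStream, streamAcc, ih]; omega

theorem streamAcc_length (b : Int) (seq : List Int) : (streamAcc b seq).length = seq.length := by
  induction seq generalizing b with
  | nil => rfl
  | cons v t ih => simp [streamAcc, ih]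

theorem foldB_char (seq : List Int) : ∀ (acc : List Int) (b : Int),
    seq.foldl (fun (st : List Int × Int) v =>
      (st.1 ++ [PySem.Int.floordiv st.2 2 + v], PySem.Int.floordiv st.2 2 + v)) (acc, b)
      = (acc ++ streamAcc b seq, (streamAcc b seq).getLastD b) := by
  induction seq with
  | nil => intro acc b; simp [streamAcc]
  | cons v t ih =>
    intro acc b
    rw [List.foldl_cons, streamAcc, ih, List.getLastD_cons]
    simp

theorem solve_alt_eq_runStream (N M K : Int) (pq : List Int) :
    solve_alt N M K pq = runStream 0 [] 0 (sortedDesc (Em M K pq)) := by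
  have hv : pq.foldl (fun acc x => acc ++ descent M K (-x)) [] = Em M K pq := by
    rw [PySem.List.foldl_append_eq_flatMap]
    rfl
  show ((((PySem.List.sorted (pq.foldl (fun acc x => acc ++ descent M K (-x)) []) (fun v => v) true).foldl
      (fun (st : List Int × Int) v =>
        (st.1 ++ [PySem.Int.floordiv st.2 2 + v], PySem.Int.floordiv st.2 2 + v)) ([], 0)).1.length : Int),
      _) = _
  rw [hv, foldB_char]
  rw [runStream_char]
  simp [streamAcc_length, sortedDesc]

-- ===== VERDICT (by name: the statement is the Claim_ definition above) =====
theorem solve_fuel (M K : Int) (pq : List Int) :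
    (Em M K pq).length ≤ pq.foldl (fun acc x => acc + ((-x - K).toNat / M.toNat + 2)) 0 := by
  rw [PySem.List.foldl_add_nat]
  rw [Em, List.length_flatMap]
  have : ∀ x ∈ pq, (descent M K (-x)).length ≤ (-x - K).toNat / M.toNat + 2 := by
    intro x _
    exact descent_len M K (-x)
  calc (pq.map fun x => (descent M K (-x)).length).sum
      ≤ (pq.map fun x => (-x - K).toNat / M.toNat + 2).sum := List.sum_le_sum this
    _ = 0 + (pq.map fun x => (-x - K).toNat / M.toNat + 2).sum := by omega

theorem solve_spec : Claim_equal_solve := by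
  intro N M K pq _ hpre
  show solve N M K pq = solve_alt N M K pq
  rw [solve_alt_eq_runStream]
  exact solveLoop_eq_runStream M K _ pq 0 [] 0 hpre.1 hpre.2 (solve_fuel M K pq)
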